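-- pv_equiv track=rewrite | github.com/mkenjayev99/Hackerrank_solutions | contest.isystem.uz problems/29 (v2.0).py | Solve
-- ===== SOURCE A (Python) =====
-- def Solve(n, m):
--
--     x_axis = [-2, -1, 1, 2]
--     y_axis = [1, 2, 2, 1]
--
--     cou = 0
--
--     for i in range(m):
--         for j in range(n):
--             for k in range(4):
--                 x = i + x_axis[k]
--                 y = j + y_axis[k]
--
--                 if (x>=0 and x<m and y>=0 and y<n):
--                     cou += 1
--
--     total = m*n
--     total = total*(total -1)//2
--
--     return 2*(total - cou)
-- ===== SOURCE B (Python) =====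
-- def Solve(n, m):
--     # Closed form: for each knight offset (dx, dy), the number of placements
--     # with both cells on the board is max(m-|dx|, 0) * max(n-|dy|, 0).
--     cou = 2 * (max(m - 2, 0) * max(n - 1, 0) + max(m - 1, 0) * max(n - 2, 0))
--     total = m * n
--     return 2 * (total * (total - 1) // 2 - cou)
-- ===== Notes on version B (the rewrite author's own statement) =====
-- stated objective: faster
-- what changed: Replaced the triple nested loop over all cells and the four knight offsets by a closed-form count per offset (max(m-|dx|,0)*max(n-|dy|,0)), making the function O(1).
import Mathlib
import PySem

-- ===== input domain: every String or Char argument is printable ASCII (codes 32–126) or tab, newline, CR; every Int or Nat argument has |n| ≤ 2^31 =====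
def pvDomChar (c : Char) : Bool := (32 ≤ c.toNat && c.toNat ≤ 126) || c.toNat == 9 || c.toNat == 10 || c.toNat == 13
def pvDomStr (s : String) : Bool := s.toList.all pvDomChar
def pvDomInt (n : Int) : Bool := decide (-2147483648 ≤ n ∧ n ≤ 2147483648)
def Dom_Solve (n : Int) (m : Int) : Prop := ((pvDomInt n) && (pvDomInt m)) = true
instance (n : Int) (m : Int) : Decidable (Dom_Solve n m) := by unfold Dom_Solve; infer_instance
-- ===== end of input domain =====

-- B replaces A's triple nested loop over all cells by a closed-form per-offset count; objective: faster (O(1) vs O(n*m)).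


-- ===== PORT A =====
-- x_axis[k]/y_axis[k]: k ranges over 0..3 so the index is always in range; pyGetD is exact here.
def Solve (n : Int) (m : Int) : Int :=
  let x_axis : List Int := [-2, -1, 1, 2]
  let y_axis : List Int := [1, 2, 2, 1]
  let cou : Int :=
    (PySem.List.pyRange 0 m 1).foldl (fun cou i =>
      (PySem.List.pyRange 0 n 1).foldl (fun cou j =>
        (PySem.List.pyRange 0 4 1).foldl (fun cou k =>
          let x := i + PySem.List.pyGetD x_axis k 0
          let y := j + PySem.List.pyGetD y_axis k 0
          if 0 ≤ x ∧ x < m ∧ 0 ≤ y ∧ y < n then cou + 1 else cou) cou) cou) 0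
  let total := m * n
  let total := PySem.Int.floordiv (total * (total - 1)) 2
  2 * (total - cou)

-- ===== PORT B =====
def Solve_alt (n : Int) (m : Int) : Int :=
  let cou := 2 * (max (m - 2) 0 * max (n - 1) 0 + max (m - 1) 0 * max (n - 2) 0)
  let total := m * n
  2 * (PySem.Int.floordiv (total * (total - 1)) 2 - cou)

-- ===== PRECONDITION & SPEC =====
def Spec_Solve (n : Int) (m : Int) (out : Int) : Prop := out = Solve_alt n m
instance (n : Int) (m : Int) (out : Int) : Decidable (Spec_Solve n m out) := by unfold Spec_Solve; infer_instance

-- ===== CLAIM (what is proved, stated in full; the proofs are below) =====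
def Claim_equal_Solve : Prop := ∀ (n : Int) (m : Int), Dom_Solve n m → Spec_Solve n m (Solve n m)

-- ===== LEMMAS AND PROOFS =====

-- 0/1 indicator of a cell (x, y) lying on the m×n board.
def pvInd (m n x y : Int) : Int := if 0 ≤ x ∧ x < m ∧ 0 ≤ y ∧ y < n then 1 else 0

-- How many j ∈ range(N) satisfy a ≤ j < b: the length of the interval intersection.
lemma pv_count_band (N : Nat) (a b : Int) :
    ((PySem.List.pyRange 0 (N : Int) 1).map (fun j => if a ≤ j ∧ j < b then (1 : Int) else 0)).sum
      = max 0 (min (N : Int) b - max 0 a) := by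
  induction N with
  | zero => simp
  | succ N ih =>
    rw [show ((N + 1 : Nat) : Int) = (N : Int) + 1 by push_cast; ring,
        PySem.List.pyRange_one_succ_right (by positivity)]
    simp only [List.map_append, List.sum_append, ih, List.map_cons, List.map_nil, List.sum_cons,
      List.sum_nil]
    split_ifs with h <;> omega

lemma pv_count_band_int (n a b : Int) :
    ((PySem.List.pyRange 0 n 1).map (fun j => if a ≤ j ∧ j < b then (1 : Int) else 0)).sum
      = max 0 (min n b - max 0 a) := by
  by_cases h : n ≤ 0
  · rw [PySem.List.pyRange_one_eq_nil (by omega)]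
    simp
    omega
  · have hn : n = ((n.toNat : Nat) : Int) := by omega
    rw [hn, pv_count_band]

-- count of j ∈ range(n) with 0 ≤ j+d < n, as a shifted interval
lemma pv_shift_count (n d : Int) :
    ((PySem.List.pyRange 0 n 1).map (fun j => if 0 ≤ j + d ∧ j + d < n then (1 : Int) else 0)).sum
      = max 0 (min n (n - d) - max 0 (-d)) := by
  have h : ∀ j : Int, (if 0 ≤ j + d ∧ j + d < n then (1 : Int) else 0)
      = (if -d ≤ j ∧ j < n - d then 1 else 0) := fun j => by split_ifs <;> omega
  simp only [h]
  exact pv_count_band_int n (-d) (n - d)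

lemma pv_sum_ite_const (l : List Int) (p : Prop) [Decidable p] (f : Int → Int) :
    (l.map (fun j => if p then f j else 0)).sum = if p then (l.map f).sum else 0 := by
  split_ifs with h <;> simp

lemma pv_sum_ite_mul (l : List Int) (p : Int → Prop) [DecidablePred p] (C : Int) :
    (l.map (fun i => if p i then C else 0)).sum
      = C * (l.map (fun i => if p i then (1 : Int) else 0)).sum := by
  induction l with
  | nil => simp
  | cons x t ih => simp only [List.map_cons, List.sum_cons, ih]; split_ifs <;> ring

-- the four-term sum in the loop body splits into four sums
lemma pv_sum_map_add4 (l : List Int) (f1 f2 f3 f4 : Int → Int) :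
    (l.map (fun j => f1 j + f2 j + f3 j + f4 j)).sum
      = (l.map f1).sum + (l.map f2).sum + (l.map f3).sum + (l.map f4).sum := by
  induction l with
  | nil => simp
  | cons x t ih => simp only [List.map_cons, List.sum_cons, ih]; ring

-- the unrolled k-loop
lemma pv_kloop (m n c i j : Int) :
    (PySem.List.pyRange 0 4 1).foldl (fun cou k =>
        let x := i + PySem.List.pyGetD [-2, -1, 1, 2] k 0
        let y := j + PySem.List.pyGetD [1, 2, 2, 1] k 0
        if 0 ≤ x ∧ x < m ∧ 0 ≤ y ∧ y < n then cou + 1 else cou) c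
      = c + (pvInd m n (i - 2) (j + 1) + pvInd m n (i - 1) (j + 2)
             + pvInd m n (i + 1) (j + 2) + pvInd m n (i + 2) (j + 1)) := by
  have h4 : PySem.List.pyRange 0 4 1 = [0, 1, 2, 3] := by decide
  rw [h4]
  simp only [List.foldl]
  rw [show PySem.List.pyGetD [(-2 : Int), -1, 1, 2] 0 0 = -2 from by decide,
      show PySem.List.pyGetD [(-2 : Int), -1, 1, 2] 1 0 = -1 from by decide,
      show PySem.List.pyGetD [(-2 : Int), -1, 1, 2] 2 0 = 1 from by decide,
      show PySem.List.pyGetD [(-2 : Int), -1, 1, 2] 3 0 = 2 from by decide,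
      show PySem.List.pyGetD [(1 : Int), 2, 2, 1] 0 0 = 1 from by decide,
      show PySem.List.pyGetD [(1 : Int), 2, 2, 1] 1 0 = 2 from by decide,
      show PySem.List.pyGetD [(1 : Int), 2, 2, 1] 2 0 = 2 from by decide,
      show PySem.List.pyGetD [(1 : Int), 2, 2, 1] 3 0 = 1 from by decide]
  simp only [pvInd]
  split_ifs <;> omega

-- indicator of a cell splits into a column condition and a row condition
lemma pv_ind_split (m n x y : Int) :
    pvInd m n x y = if 0 ≤ x ∧ x < m then (if 0 ≤ y ∧ y < n then (1 : Int) else 0) else 0 := by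
  unfold pvInd; split_ifs <;> omega

lemma pv_cou_eq (n m : Int) :
    (PySem.List.pyRange 0 m 1).foldl (fun cou i =>
      (PySem.List.pyRange 0 n 1).foldl (fun cou j =>
        (PySem.List.pyRange 0 4 1).foldl (fun cou k =>
          let x := i + PySem.List.pyGetD [-2, -1, 1, 2] k 0
          let y := j + PySem.List.pyGetD [1, 2, 2, 1] k 0
          if 0 ≤ x ∧ x < m ∧ 0 ≤ y ∧ y < n then cou + 1 else cou) cou) cou) 0
      = 2 * (max (m - 2) 0 * max (n - 1) 0 + max (m - 1) 0 * max (n - 2) 0) := by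
  have e1 : max 0 (min n (n - 1) - max 0 (-(1 : Int))) = max 0 (n - 1) := by omega
  have e2 : max 0 (min n (n - 2) - max 0 (-(2 : Int))) = max 0 (n - 2) := by omega
  -- the j-loop for a fixed i, in closed form
  have hj : ∀ (i c : Int),
      (PySem.List.pyRange 0 n 1).foldl (fun cou j =>
        (PySem.List.pyRange 0 4 1).foldl (fun cou k =>
          let x := i + PySem.List.pyGetD [-2, -1, 1, 2] k 0
          let y := j + PySem.List.pyGetD [1, 2, 2, 1] k 0
          if 0 ≤ x ∧ x < m ∧ 0 ≤ y ∧ y < n then cou + 1 else cou) cou) c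
      = c + ((if 0 ≤ i - 2 ∧ i - 2 < m then max 0 (n - 1) else 0)
           + (if 0 ≤ i - 1 ∧ i - 1 < m then max 0 (n - 2) else 0)
           + (if 0 ≤ i + 1 ∧ i + 1 < m then max 0 (n - 2) else 0)
           + (if 0 ≤ i + 2 ∧ i + 2 < m then max 0 (n - 1) else 0)) := by
    intro i c
    have hb : (fun cou j =>
        (PySem.List.pyRange 0 4 1).foldl (fun cou k =>
          let x := i + PySem.List.pyGetD [-2, -1, 1, 2] k 0
          let y := j + PySem.List.pyGetD [1, 2, 2, 1] k 0
          if 0 ≤ x ∧ x < m ∧ 0 ≤ y ∧ y < n then cou + 1 else cou) cou)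
        = fun cou j => cou + (pvInd m n (i - 2) (j + 1) + pvInd m n (i - 1) (j + 2)
             + pvInd m n (i + 1) (j + 2) + pvInd m n (i + 2) (j + 1)) := by
      funext cou j; exact pv_kloop m n cou i j
    rw [hb]
    rw [PySem.List.foldl_add]
    congr 1
    simp only [pv_ind_split]
    rw [pv_sum_map_add4]
    rw [pv_sum_ite_const, pv_sum_ite_const, pv_sum_ite_const, pv_sum_ite_const]
    simp only [pv_shift_count]
    rw [e1, e2]
  have hb2 : (fun cou i =>
      (PySem.List.pyRange 0 n 1).foldl (fun cou j =>
        (PySem.List.pyRange 0 4 1).foldl (fun cou k =>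
          let x := i + PySem.List.pyGetD [-2, -1, 1, 2] k 0
          let y := j + PySem.List.pyGetD [1, 2, 2, 1] k 0
          if 0 ≤ x ∧ x < m ∧ 0 ≤ y ∧ y < n then cou + 1 else cou) cou) cou)
      = fun c i => c + ((if 0 ≤ i - 2 ∧ i - 2 < m then max 0 (n - 1) else 0)
           + (if 0 ≤ i - 1 ∧ i - 1 < m then max 0 (n - 2) else 0)
           + (if 0 ≤ i + 1 ∧ i + 1 < m then max 0 (n - 2) else 0)
           + (if 0 ≤ i + 2 ∧ i + 2 < m then max 0 (n - 1) else 0)) := by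
    funext c i; exact hj i c
  rw [hb2]
  rw [PySem.List.foldl_add]
  rw [pv_sum_map_add4]
  rw [pv_sum_ite_mul _ (fun i => 0 ≤ i - 2 ∧ i - 2 < m),
      pv_sum_ite_mul _ (fun i => 0 ≤ i - 1 ∧ i - 1 < m),
      pv_sum_ite_mul _ (fun i => 0 ≤ i + 1 ∧ i + 1 < m),
      pv_sum_ite_mul _ (fun i => 0 ≤ i + 2 ∧ i + 2 < m)]
  have hc : ∀ d : Int, (fun i => if 0 ≤ i - d ∧ i - d < m then (1 : Int) else 0)
      = fun i => if 0 ≤ i + (-d) ∧ i + (-d) < m then (1 : Int) else 0 := by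
    intro d; funext i; split_ifs <;> omega
  rw [show (fun i => if 0 ≤ i - 2 ∧ i - 2 < m then (1 : Int) else 0)
        = fun i => if 0 ≤ i + (-2) ∧ i + (-2) < m then (1 : Int) else 0 from hc 2,
      show (fun i => if 0 ≤ i - 1 ∧ i - 1 < m then (1 : Int) else 0)
        = fun i => if 0 ≤ i + (-1) ∧ i + (-1) < m then (1 : Int) else 0 from hc 1]
  simp only [pv_shift_count]
  have f1 : max 0 (min m (m - -2) - max 0 (-(-2 : Int))) = max 0 (m - 2) := by omega
  have f2 : max 0 (min m (m - -1) - max 0 (-(-1 : Int))) = max 0 (m - 1) := by omega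
  have f3 : max 0 (min m (m - 1) - max 0 (-(1 : Int))) = max 0 (m - 1) := by omega
  have f4 : max 0 (min m (m - 2) - max 0 (-(2 : Int))) = max 0 (m - 2) := by omega
  rw [f1, f2, f3, f4]
  simp only [show ∀ x : Int, max 0 x = max x 0 from fun x => max_comm 0 x]
  ring

-- ===== VERDICT (by name: the statement is the Claim_ definition above) =====
theorem Solve_spec : Claim_equal_Solve := by
  intro n m _
  unfold Spec_Solve
  simp only [Solve, Solve_alt]
  rw [pv_cou_eq]
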